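-- pv_equiv track=rewrite | github.com/andresdh/CodeFights | Arcade/05_shapeArea.py | shapeArea
-- ===== SOURCE A (Python) =====
-- def shapeArea(n):
--     shape_squares = []
--     for number in range(1,n+1):
--         shape_squares.append(number)
--
--     shape_area = sum(shape_squares)
--     cuadrado = n ** 2
--     unshape_area = (cuadrado - shape_area) * 4
--
--     shape_area = (n + (n - 1)) ** 2 - unshape_area
--     return shape_area
-- ===== SOURCE B (Python) =====
-- def shapeArea(n):
--     # closed form: diamond of size n has n^2 + (n-1)^2 unit squares
--     return n * n + (n - 1) * (n - 1)
-- ===== Notes on version B (the rewrite author's own statement) =====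
-- stated objective: faster
-- what changed: replaces the list-building loop and sum over range(1,n+1) with the closed-form formula n^2 + (n-1)^2
-- outside the precondition, e.g. on shapeArea(-2): A returns 9, B returns 13
import Mathlib
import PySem

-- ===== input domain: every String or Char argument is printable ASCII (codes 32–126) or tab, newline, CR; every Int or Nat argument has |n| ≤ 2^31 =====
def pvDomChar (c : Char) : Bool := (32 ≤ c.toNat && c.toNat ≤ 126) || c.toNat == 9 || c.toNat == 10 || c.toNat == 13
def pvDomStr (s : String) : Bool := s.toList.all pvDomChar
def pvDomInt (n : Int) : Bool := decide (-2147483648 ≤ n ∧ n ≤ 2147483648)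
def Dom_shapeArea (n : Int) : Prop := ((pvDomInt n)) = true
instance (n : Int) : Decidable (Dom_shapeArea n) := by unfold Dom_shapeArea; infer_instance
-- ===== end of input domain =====

-- B replaces A's list-building loop and sum with the closed-form n^2 + (n-1)^2 (O(1) vs O(n)).


-- ===== PORT A =====
def shapeArea (n : Int) : Int :=
  let shape_squares : List Int :=
    (PySem.List.pyRange 1 (n + 1) 1).foldl (fun acc number => acc ++ [number]) []
  let shape_area : Int := shape_squares.sum
  let cuadrado : Int := n ^ 2
  let unshape_area : Int := (cuadrado - shape_area) * 4
  (n + (n - 1)) ^ 2 - unshape_area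

-- ===== PORT B =====
def shapeArea_alt (n : Int) : Int := n * n + (n - 1) * (n - 1)

-- ===== PRECONDITION & SPEC =====
-- Pre_ restricts to nonnegative sizes, the task's natural domain; for negative n A's loop is
-- empty and the returned value is an artifact of that empty sum, which no caller would specify
def Pre_shapeArea (n : Int) : Prop := 0 ≤ n
instance (n : Int) : Decidable (Pre_shapeArea n) := by unfold Pre_shapeArea; infer_instance
def pvWitness_shapeArea : Int := (3)
def Spec_shapeArea (n : Int) (out : Int) : Prop := out = shapeArea_alt n
instance (n : Int) (out : Int) : Decidable (Spec_shapeArea n out) := by unfold Spec_shapeArea; infer_instance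

-- ===== CLAIM (what is proved, stated in full; the proofs are below) =====
def Claim_equal_shapeArea : Prop := ∀ (n : Int), Dom_shapeArea n → Pre_shapeArea n → Spec_shapeArea n (shapeArea n)

-- ===== LEMMAS AND PROOFS =====

theorem foldl_append_id (l acc : List Int) :
    l.foldl (fun acc number => acc ++ [number]) acc = acc ++ l := by
  induction l generalizing acc with
  | nil => simp
  | cons x xs ih => simp [List.foldl, ih]

theorem two_mul_sum_pyRange (m : Nat) :
    2 * ((PySem.List.pyRange 1 ((m : Int) + 1) 1).sum) = (m : Int) * (m + 1) := by
  induction m with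
  | zero => simp [PySem.List.pyRange_one_eq_nil]
  | succ k ih =>
      have h : PySem.List.pyRange 1 (((k : Int) + 1) + 1) 1
          = PySem.List.pyRange 1 ((k : Int) + 1) 1 ++ [(k : Int) + 1] := by
        have := PySem.List.pyRange_one_succ_right (a := 1) (b := (k : Int) + 1) (by omega)
        simpa using this
      push_cast
      rw [h]
      simp only [List.sum_append, List.sum_cons, List.sum_nil]
      push_cast at ih
      ring_nf
      ring_nf at ih
      omega

-- ===== VERDICT (by name: the statement is the Claim_ definition above) =====
theorem shapeArea_spec : Claim_equal_shapeArea := by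
  intro n _ hpre
  unfold Spec_shapeArea shapeArea shapeArea_alt
  simp only [foldl_append_id, List.nil_append]
  have hm : ((n.toNat : Int)) = n := Int.toNat_of_nonneg hpre
  have := two_mul_sum_pyRange n.toNat
  rw [hm] at this
  ring_nf
  ring_nf at this
  omega
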